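-- pv_equiv track=rewrite | github.com/KIM-KYOUNG-OH/Algorithm-by-python | 2021 Line Coding Test/2번 전월 이슈 검색어.py | solution
-- ===== SOURCE A (Python) =====
-- def solution(research, n, k):
--     issue_search_words = dict()  # 이슈검색어 저장할 dictionary
--     research_dic = list()  # research to dictionary
--     days = len(research)  # 일 수
--     if days < n:
--         return 'None'
--
--     for data in research:
--         temp = dict()
--         for word in set(data):
--             temp[word] = data.count(word)
--         research_dic.append(temp)
--
--     for i in range(0, days - n + 1):
--         for word in research_dic[i]:
--             total_search_cnt = 0  # 총 검색 횟수
--             breaker = False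
--             for j in range(i, i + n):
--                 if word not in research_dic[j]:  # 이슈검색어가 되는 1번 조건 위반
--                     breaker = True
--                     break
--                 search_cnt = research_dic[j][word]  # 검색 횟수
--                 if search_cnt < k:  # 이슈검색어가 되는 1번 조건 위반
--                     breaker = True
--                     break
--                 total_search_cnt += search_cnt
--             if breaker:
--                 continue
--             if total_search_cnt >= (2 * n * k):  # 이슈검색어가 되는 2번 조건 체크
--                 if word in issue_search_words:
--                     issue_search_words[word] += 1
--                 else:
--                     issue_search_words[word] = 1
--
--     if not issue_search_words:
--         return 'None'
--     # (이슈검색어가 된 횟수, 사전)순 정렬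
--     best_issue_search_word = sorted(issue_search_words.items(), key=lambda x: (-x[1], x[0]))
--     answer = best_issue_search_word[0][0]
--     return answer
-- ===== SOURCE B (Python) =====
-- def solution(research, n, k):
--     # Word-major re-implementation: one count vector per word, scan each
--     # n-day window of it; words visited in sorted order so the first strict
--     # maximum is the lexicographically-smallest best word.
--     days = len(research)
--     if days < n:
--         return 'None'
--     words = sorted(set(w for day in research for w in day))
--     best = None  # (wins, word); first strict max kept => smallest word on ties
--     for w in words:
--         c = [day.count(w) for day in research]
--         wins = 0
--         for i in range(days - n + 1):
--             window = c[i:i + n]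
--             if all(x >= k and x >= 1 for x in window) and sum(window) >= 2 * n * k:
--                 wins += 1
--         if wins > 0 and (best is None or wins > best[0]):
--             best = (wins, w)
--     return best[1] if best is not None else 'None'
-- ===== Notes on version B (the rewrite author's own statement) =====
-- stated objective: alternative
-- what changed: B is word-major instead of window-major: it builds one count vector per (sorted) word and scans each n-day window of that vector keeping a running first-strict-maximum, instead of A's per-day count dictionaries, a triple loop over windows/dict-keys/days with a breaker flag, a counting dictionary and a final tuple-key sort; Pre_ excludes only n <= 0, where A raises IndexError.
import Mathlib
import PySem

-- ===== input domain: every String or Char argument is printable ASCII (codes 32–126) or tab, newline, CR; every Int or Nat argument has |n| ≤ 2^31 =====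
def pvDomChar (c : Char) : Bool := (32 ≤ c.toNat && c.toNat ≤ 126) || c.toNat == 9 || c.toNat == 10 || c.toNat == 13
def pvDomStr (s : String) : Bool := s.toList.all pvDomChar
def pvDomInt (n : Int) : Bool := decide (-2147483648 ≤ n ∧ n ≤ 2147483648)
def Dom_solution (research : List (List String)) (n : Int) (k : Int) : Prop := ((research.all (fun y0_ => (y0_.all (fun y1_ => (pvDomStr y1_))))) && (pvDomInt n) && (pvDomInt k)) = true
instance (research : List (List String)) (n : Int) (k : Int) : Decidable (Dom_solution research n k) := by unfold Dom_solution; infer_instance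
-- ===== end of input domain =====

-- B is a word-major re-implementation (one count vector per sorted word, window scan with a
-- running first-strict-maximum) of A's window-major triple loop; equal on Pre_ (1 ≤ n).

-- ===== PORT A =====
-- Python A iterates `set(data)` and dict keys; the result is independent of that iteration
-- order (a counter is built and the final sort's key is injective), so the port iterates the
-- PySem.Set / Dict.keys in first-occurrence order.
-- `research_dic[j]` is read through `(pyGet? …).getD Dict.empty`: under Pre_ (1 ≤ n) every
-- such index is in range, exactly where Python does not raise.
def solution (research : List (List String)) (n : Int) (k : Int) : String :=
  let days : Int := PySem.List.len research
  if days < n then "None" else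
  let research_dic : List (PySem.Dict String Int) :=
    research.foldl (fun acc data =>
      acc ++ [(PySem.Set.ofList data).foldl
                (fun temp word => temp.insert word ((PySem.List.count data word : Nat) : Int))
                PySem.Dict.empty]) []
  let issue : PySem.Dict String Int :=
    (PySem.List.pyRange 0 (days - n + 1) 1).foldl (fun issue i =>
      let dic_i := (PySem.List.pyGet? research_dic i).getD PySem.Dict.empty
      dic_i.keys.foldl (fun issue word =>
        let st : Int × Bool :=
          (PySem.List.pyRange i (i + n) 1).foldl (fun st j =>
            if st.2 then st    -- after `break` nothing further changes
            else
              match ((PySem.List.pyGet? research_dic j).getD PySem.Dict.empty).get? word with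
              | none => (st.1, true)
              | some search_cnt =>
                  if search_cnt < k then (st.1, true) else (st.1 + search_cnt, false))
            ((0 : Int), false)
        if st.2 then issue
        else if st.1 ≥ 2 * n * k then issue.insert word (issue.getD word 0 + 1)
        else issue) issue)
      PySem.Dict.empty
  if issue.items.isEmpty then "None"
  else
    let best := PySem.List.sorted2 issue.items (fun x => -x.2) (fun x => x.1) false
    ((PySem.List.pyGet? best 0).map (fun p => p.1)).getD "None"   -- index 0 of a nonempty list

-- ===== PORT B =====
def solution_alt (research : List (List String)) (n : Int) (k : Int) : String :=
  let days : Int := PySem.List.len research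
  if days < n then "None" else
  let words : List String :=
    PySem.List.sorted (PySem.Set.ofList (research.flatMap (fun day => day))) (fun x => x) false
  let best : Option (Int × String) :=
    words.foldl (fun best w =>
      let c : List Int :=
        research.foldl (fun acc day => acc ++ [((PySem.List.count day w : Nat) : Int)]) []
      let wins : Int :=
        (PySem.List.pyRange 0 (days - n + 1) 1).foldl (fun wins i =>
          let window := PySem.List.slice c (some i) (some (i + n))
          if (window.all fun x => decide (x ≥ k) && decide (x ≥ 1)) &&
             decide (window.sum ≥ 2 * n * k)
          then wins + 1 else wins) 0
      match best with
      | none => if wins > 0 then some (wins, w) else none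
      | some b => if wins > 0 ∧ wins > b.1 then some (wins, w) else some b) none
  match best with
  | some (_, w) => w
  | none => "None"

-- ===== PRECONDITION & SPEC =====
-- Pre_ excludes exactly n ≤ 0: there A always raises IndexError (its window loop indexes
-- research_dic[len(research)]); on every input with 1 ≤ n the Python A returns normally.
def Pre_solution (research : List (List String)) (n : Int) (k : Int) : Prop := 1 ≤ n
instance (research : List (List String)) (n : Int) (k : Int) : Decidable (Pre_solution research n k) := by unfold Pre_solution; infer_instance
def pvWitness_solution : List (List String) × Int × Int := ([["a", "b"], ["a"]], 1, 1)
def Spec_solution (research : List (List String)) (n : Int) (k : Int) (out : String) : Prop := out = solution_alt research n k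
instance (research : List (List String)) (n : Int) (k : Int) (out : String) : Decidable (Spec_solution research n k out) := by unfold Spec_solution; infer_instance

-- ===== CLAIM (what is proved, stated in full; the proofs are below) =====
def Claim_equal_solution : Prop := ∀ (research : List (List String)) (n : Int) (k : Int), Dom_solution research n k → Pre_solution research n k → Spec_solution research n k (solution research n k)

-- ===== LEMMAS AND PROOFS =====

-- ===== LEMMAAS =====

-- spec-level values shared by both directions of the proof
def pvCnt (day : List String) (w : String) : Int := ((PySem.List.count day w : Nat) : Int)

def pvWin (research : List (List String)) (nn : Nat) (w : String) (i : Nat) : List Int :=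
  ((research.drop i).take nn).map (fun day => pvCnt day w)

def pvPred (research : List (List String)) (n k : Int) (w : String) (i : Nat) : Bool :=
  ((pvWin research n.toNat w i).all fun x => decide (x ≥ k) && decide (x ≥ 1)) &&
  decide ((pvWin research n.toNat w i).sum ≥ 2 * n * k)

def pvDD (research : List (List String)) (n : Int) : Nat := research.length - n.toNat + 1

def pvN (research : List (List String)) (n k : Int) (w : String) : Nat :=
  (List.range (pvDD research n)).countP (pvPred research n k w)

def pvBlock (research : List (List String)) (n k : Int) (i : Nat) : List String :=
  (PySem.Set.ofList (research.getD i [])).filter (fun w => pvPred research n k w i)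

def pvE (research : List (List String)) (n k : Int) : List String :=
  (List.range (pvDD research n)).flatMap (pvBlock research n k)

def pvWords (research : List (List String)) : List String :=
  PySem.List.sorted (PySem.Set.ofList (research.flatMap (fun day => day))) (fun x => x) false

def pvPairStep (f : String → Int) (p : Int × String) (w : String) : Int × String :=
  if f w > p.1 then (f w, w) else p

def pvAnswer (research : List (List String)) (n k : Int) : String :=
  match (pvWords research).filter (fun w => decide (0 < pvN research n k w)) with
  | [] => "None"
  | w1 :: rest =>
      (rest.foldl (pvPairStep (fun w => (pvN research n k w : Int)))
        ((pvN research n k w1 : Int), w1)).2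

-- window as an indexed list (used to line A's day-indexed loop up with B's slice)
theorem pvWin_eq_range (research : List (List String)) (nn : Nat) (w : String) (i : Nat)
    (h : i + nn ≤ research.length) :
    pvWin research nn w i = (List.range nn).map (fun j => pvCnt (research.getD (i + j) []) w) := by
  apply List.ext_getElem
  · simp [pvWin]; omega
  · intro j hj1 hj2
    simp only [pvWin, List.getElem_map, List.getElem_take, List.getElem_drop, List.getElem_range]
    have hlt : i + j < research.length := by simp [pvWin] at hj1; omega
    rw [List.getD_eq_getElem _ _ hlt]

-- a word counted by pvPred occurs on day i
theorem pvPred_mem (research : List (List String)) (n k : Int) (w : String) (i : Nat)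
    (hn : 1 ≤ n) (hi : i + n.toNat ≤ research.length)
    (hp : pvPred research n k w i = true) : w ∈ research.getD i [] := by
  have hw := pvWin_eq_range research n.toNat w i hi
  have hnn : 1 ≤ n.toNat := by omega
  simp only [pvPred, Bool.and_eq_true, List.all_eq_true] at hp
  obtain ⟨h1, -⟩ := hp
  have hmem : pvCnt (research.getD (i + 0) []) w ∈ pvWin research n.toNat w i := by
    rw [hw]; exact List.mem_map_of_mem (List.mem_range.mpr (by omega))
  have h2 := h1 _ hmem
  simp only [Nat.add_zero, decide_eq_true_eq] at h2
  have hc : 1 ≤ pvCnt (research.getD i []) w := h2.2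
  simp only [pvCnt, PySem.List.count_eq] at hc
  have : 0 < (research.getD i []).count w := by exact_mod_cast hc
  exact List.count_pos_iff.mp this

theorem pvN_pos_mem (research : List (List String)) (n k : Int) (w : String)
    (hn : 1 ≤ n) (hd : n ≤ (research.length : Int))
    (hw : 0 < pvN research n k w) : w ∈ research.flatMap (fun day => day) := by
  simp only [pvN, List.countP_pos_iff] at hw
  obtain ⟨i, hi, hp⟩ := hw
  have hi' : i + n.toNat ≤ research.length := by
    simp only [List.mem_range, pvDD] at hi; omega
  have hmem := pvPred_mem research n k w i hn hi' hp
  have hilt : i < research.length := by omega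
  refine List.mem_flatMap.mpr ⟨research[i], List.getElem_mem _, ?_⟩
  rwa [List.getD_eq_getElem _ _ hilt] at hmem



-- ---- B side ----

def pvOptStep (f : String → Int) (b : Option (Int × String)) (w : String) : Option (Int × String) :=
  match b with
  | none => if f w > 0 then some (f w, w) else none
  | some p => if f w > 0 ∧ f w > p.1 then some (f w, w) else some p

def pvOptStep' (f : String → Int) (b : Option (Int × String)) (w : String) : Option (Int × String) :=
  match b with
  | none => some (f w, w)
  | some p => if f w > p.1 then some (f w, w) else some p

theorem pvOptStep_eq (f : String → Int) (b : Option (Int × String)) (w : String) :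
    pvOptStep f b w = if 0 < f w then pvOptStep' f b w else b := by
  cases b with
  | none =>
      by_cases h : 0 < f w <;> simp [pvOptStep, pvOptStep', h]
  | some p =>
      by_cases h : 0 < f w <;> by_cases h2 : f w > p.1 <;>
        simp [pvOptStep, pvOptStep', h, h2]

theorem pvOpt_some (f : String → Int) :
    ∀ (l : List String) (p : Int × String),
      l.foldl (pvOptStep' f) (some p) = some (l.foldl (pvPairStep f) p) := by
  intro l
  induction l with
  | nil => intro p; rfl
  | cons w rest ih =>
      intro p
      by_cases h : f w > p.1 <;>
        simp [List.foldl_cons, pvOptStep', pvPairStep, h, ih]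

theorem pvWins_eq (research : List (List String)) (n k : Int)
    (hn : 1 ≤ n) (hd : n ≤ (research.length : Int)) (w : String) :
    (PySem.List.pyRange 0 ((research.length : Int) - n + 1) 1).foldl
      (fun wins i =>
        if ((PySem.List.slice
              (research.foldl (fun acc day => acc ++ [((PySem.List.count day w : Nat) : Int)]) [])
              (some i) (some (i + n))).all fun x => decide (x ≥ k) && decide (x ≥ 1)) &&
           decide ((PySem.List.slice
              (research.foldl (fun acc day => acc ++ [((PySem.List.count day w : Nat) : Int)]) [])
              (some i) (some (i + n))).sum ≥ 2 * n * k)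
        then wins + 1 else wins) 0
    = (pvN research n k w : Int) := by
  have hc : research.foldl (fun acc day => acc ++ [((PySem.List.count day w : Nat) : Int)]) []
      = research.map (fun day => pvCnt day w) := by
    simpa [pvCnt] using
      PySem.List.foldl_append_singleton_eq_map (fun day => pvCnt day w) research []
  simp only [hc]
  rw [PySem.List.pyRange_zero, List.foldl_map]
  have hdd : ((research.length : Int) - n + 1).toNat = pvDD research n := by
    simp only [pvDD]; omega
  rw [hdd]
  have hstep : ∀ (acc : Int), ∀ j ∈ List.range (pvDD research n),
      (fun (wins : Int) (i : Int) =>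
        if ((PySem.List.slice (research.map (fun day => pvCnt day w)) (some i) (some (i + n))).all
              fun x => decide (x ≥ k) && decide (x ≥ 1)) &&
           decide ((PySem.List.slice (research.map (fun day => pvCnt day w)) (some i)
              (some (i + n))).sum ≥ 2 * n * k)
        then wins + 1 else wins) acc ((j : Nat) : Int)
      = (if pvPred research n k w j then acc + 1 else acc) := by
    intro acc j hj
    have hb : ((j : Nat) : Int) + n = ((j : Nat) : Int) + ((n.toNat : Nat) : Int) := by omega
    have hsl : PySem.List.slice (research.map (fun day => pvCnt day w))
        (some ((j : Nat) : Int)) (some (((j : Nat) : Int) + n))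
        = pvWin research n.toNat w j := by
      rw [hb, PySem.List.slice_natCast_add]
      simp [pvWin, List.map_take, List.map_drop]
    simp only [hsl, pvPred]
    rfl
  rw [PySem.List.foldl_congr_mem _ _ _ _ hstep, PySem.List.foldl_if_add_one]
  simp [pvN]

theorem solution_alt_eq (research : List (List String)) (n k : Int)
    (hn : 1 ≤ n) (hd : n ≤ (research.length : Int)) :
    solution_alt research n k = pvAnswer research n k := by
  unfold solution_alt
  rw [PySem.List.len_eq, if_neg (by omega)]
  simp only [pvWins_eq research n k hn hd]
  show (match List.foldl (pvOptStep (fun w => ((pvN research n k w : Nat) : Int))) none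
          (pvWords research) with
        | some (_, w) => w | none => "None") = pvAnswer research n k
  have hfilter : (pvWords research).foldl (pvOptStep (fun w => (pvN research n k w : Int))) none
      = ((pvWords research).filter (fun w => decide (0 < pvN research n k w))).foldl
          (pvOptStep' (fun w => (pvN research n k w : Int))) none := by
    have h1 : ∀ (b : Option (Int × String)), ∀ w ∈ pvWords research,
        pvOptStep (fun w => (pvN research n k w : Int)) b w
        = if 0 < pvN research n k w
          then pvOptStep' (fun w => (pvN research n k w : Int)) b w else b := by
      intro b w _
      rw [pvOptStep_eq]
      by_cases h : 0 < pvN research n k w <;> simp [h]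
    rw [PySem.List.foldl_congr_mem _ _ _ _ h1,
        PySem.List.foldl_ite_eq_foldl_filter (fun w => 0 < pvN research n k w)]
  rw [hfilter]
  unfold pvAnswer
  cases hws : (pvWords research).filter (fun w => decide (0 < pvN research n k w)) with
  | nil => rfl
  | cons w1 rest =>
      simp only [List.foldl_cons]
      rw [show pvOptStep' (fun w => ((pvN research n k w : Nat) : Int)) none w1
            = some ((pvN research n k w1 : Int), w1) from rfl]
      rw [pvOpt_some]


-- ---- A side ----

def pvDict (data : List String) : PySem.Dict String Int :=
  (PySem.Set.ofList data).foldl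
    (fun temp word => temp.insert word ((PySem.List.count data word : Nat) : Int))
    PySem.Dict.empty

theorem pvDict_items (data : List String) :
    (pvDict data).items = (PySem.Set.ofList data).map (fun w => (w, pvCnt data w)) := by
  unfold pvDict
  have h := PySem.Dict.items_foldl_insert_fresh (PySem.Set.ofList data) (fun w => w)
    (fun w => ((PySem.List.count data w : Nat) : Int)) PySem.Dict.empty
    (fun a _ => by simp [PySem.Dict.contains_empty])
    (by simp only [List.map_id']; exact PySem.Set.nodup_ofList data)
  rw [h]
  rfl

theorem pvDict_keys (data : List String) : (pvDict data).keys = PySem.Set.ofList data := by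
  have : (pvDict data).keys = (pvDict data).items.map (fun p => p.1) := rfl
  rw [this, pvDict_items]
  simp [Function.comp_def]

theorem pvDict_get? (data : List String) (w : String) :
    (pvDict data).get? w = if w ∈ data then some (pvCnt data w) else none := by
  have hnd : (pvDict data).keys.Nodup := by
    rw [pvDict_keys]; exact PySem.Set.nodup_ofList data
  split_ifs with hm
  · exact PySem.Dict.get?_of_mem_items _
      (by rw [pvDict_items]; exact List.mem_map_of_mem ((PySem.Set.mem_ofList data w).mpr hm)) hnd
  · exact (PySem.Dict.get?_eq_none_iff_not_mem_keys _ _).mpr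
      (by rw [pvDict_keys]; exact fun h => hm ((PySem.Set.mem_ofList data w).mp h))

-- A's inner day loop (running total + break flag), characterized
def pvBreakStep (k : Int) (f : Int → Option Int) (st : Int × Bool) (j : Int) : Int × Bool :=
  if st.2 then st
  else match f j with
    | none => (st.1, true)
    | some c => if c < k then (st.1, true) else (st.1 + c, false)

theorem pvBreak_stuck (k : Int) (f : Int → Option Int) :
    ∀ (L : List Int) (t : Int), L.foldl (pvBreakStep k f) (t, true) = (t, true) := by
  intro L
  induction L with
  | nil => intro t; rfl
  | cons j rest ih => intro t; simpa [List.foldl_cons, pvBreakStep] using ih t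

theorem pvBreak_good (k : Int) (f : Int → Option Int) :
    ∀ (L : List Int), (∀ j ∈ L, ∃ c, f j = some c ∧ ¬ c < k) → ∀ (t : Int),
      L.foldl (pvBreakStep k f) (t, false)
        = (t + (L.map (fun j => (f j).getD 0)).sum, false) := by
  intro L
  induction L with
  | nil => intro _ t; simp
  | cons j rest ih =>
      intro h t
      obtain ⟨c, hc, hk⟩ := h j (List.mem_cons_self)
      rw [List.foldl_cons, show pvBreakStep k f (t, false) j = (t + c, false) by
            simp [pvBreakStep, hc, hk]]
      rw [ih (fun j hj => h j (List.mem_cons_of_mem _ hj)) (t + c)]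
      simp [hc]
      ring

theorem pvBreak_bad (k : Int) (f : Int → Option Int) :
    ∀ (L : List Int), (∃ j ∈ L, ∀ c, f j = some c → c < k) → ∀ (t : Int),
      (L.foldl (pvBreakStep k f) (t, false)).2 = true := by
  intro L
  induction L with
  | nil => rintro ⟨j, hj, -⟩; simp at hj
  | cons j rest ih =>
      rintro ⟨j', hj', hbad⟩ t
      rcases List.mem_cons.mp hj' with rfl | hmem
      · cases hfc : f j' with
        | none =>
            rw [List.foldl_cons, show pvBreakStep k f (t, false) j' = (t, true) by
                  simp [pvBreakStep, hfc]]
            simp [pvBreak_stuck]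
        | some c =>
            have hck : c < k := hbad c hfc
            rw [List.foldl_cons, show pvBreakStep k f (t, false) j' = (t, true) by
                  simp [pvBreakStep, hfc, hck]]
            simp [pvBreak_stuck]
      · cases hfc : f j with
        | none =>
            rw [List.foldl_cons, show pvBreakStep k f (t, false) j = (t, true) by
                  simp [pvBreakStep, hfc]]
            simp [pvBreak_stuck]
        | some c =>
            by_cases hck : c < k
            · rw [List.foldl_cons, show pvBreakStep k f (t, false) j = (t, true) by
                    simp [pvBreakStep, hfc, hck]]
              simp [pvBreak_stuck]
            · rw [List.foldl_cons, show pvBreakStep k f (t, false) j = (t + c, false) by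
                    simp [pvBreakStep, hfc, hck]]
              exact ih ⟨j', hmem, hbad⟩ (t + c)

theorem pvE_count (research : List (List String)) (n k : Int)
    (hn : 1 ≤ n) (hd : n ≤ (research.length : Int)) (w : String) :
    (pvE research n k).count w = pvN research n k w := by
  unfold pvE pvBlock pvN
  rw [List.count_flatMap]
  have hcongr : ∀ i ∈ List.range (pvDD research n),
      (List.count w ∘ fun i =>
        (PySem.Set.ofList (research.getD i [])).filter (fun w => pvPred research n k w i)) i
      = (if pvPred research n k w i then (1 : Nat) else 0) := by
    intro i hi
    have hi' : i + n.toNat ≤ research.length := by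
      simp only [List.mem_range, pvDD] at hi; omega
    have hnd : ((PySem.Set.ofList (research.getD i [])).filter
        (fun w => pvPred research n k w i)).Nodup :=
      (PySem.Set.nodup_ofList _).filter _
    simp only [Function.comp]
    by_cases hp : pvPred research n k w i
    · rw [List.count_eq_one_of_mem hnd, if_pos hp]
      rw [List.mem_filter]
      exact ⟨(PySem.Set.mem_ofList _ _).mpr (pvPred_mem research n k w i hn hi' hp), hp⟩
    · rw [if_neg hp, List.count_eq_zero_of_not_mem]
      intro hmem
      exact hp (List.mem_filter.mp hmem).2
  rw [List.map_congr_left hcongr]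
  exact PySem.List.sum_map_ite_one_zero_nat _ _


def pvDicAt (dic : List (PySem.Dict String Int)) (j : Int) : PySem.Dict String Int :=
  (PySem.List.pyGet? dic j).getD PySem.Dict.empty

def pvInner (dic : List (PySem.Dict String Int)) (n k : Int) (i : Int) (word : String) : Int × Bool :=
  (PySem.List.pyRange i (i + n) 1).foldl
    (pvBreakStep k (fun j => (pvDicAt dic j).get? word)) (0, false)

def pvWordStepD (dic : List (PySem.Dict String Int)) (n k : Int) (i : Int)
    (issue : PySem.Dict String Int) (word : String) : PySem.Dict String Int :=
  if (pvInner dic n k i word).2 then issue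
  else if (pvInner dic n k i word).1 ≥ 2 * n * k then issue.insert word (issue.getD word 0 + 1)
  else issue

-- A's body restated through the named pieces above (definitional)
def pvIssueD (dic : List (PySem.Dict String Int)) (days n k : Int) : PySem.Dict String Int :=
  (PySem.List.pyRange 0 (days - n + 1) 1).foldl
    (fun issue i => (pvDicAt dic i).keys.foldl (pvWordStepD dic n k i) issue)
    PySem.Dict.empty

def pvFinal (issue : PySem.Dict String Int) : String :=
  if issue.items.isEmpty then "None"
  else ((PySem.List.pyGet? (PySem.List.sorted2 issue.items
          (fun x => -x.2) (fun x => x.1) false) 0).map (fun p => p.1)).getD "None"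

-- A's body restated through the named pieces above (definitional)
theorem solution_shape (research : List (List String)) (n k : Int) :
    solution research n k =
      if (PySem.List.len research) < n then "None"
      else pvFinal (pvIssueD (research.foldl (fun acc data => acc ++ [pvDict data]) [])
                      (PySem.List.len research) n k) := rfl

theorem pvDicAt_eq (research : List (List String)) (j : Nat) (hj : j < research.length) :
    pvDicAt (research.map pvDict) (j : Int) = pvDict (research.getD j []) := by
  unfold pvDicAt
  rw [PySem.List.pyGet?_natCast]
  rw [List.getElem?_map, List.getElem?_eq_getElem hj]
  simp [List.getD, List.getElem?_eq_getElem hj]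

theorem pvInner_good (research : List (List String)) (n k : Int)
    (hn : 1 ≤ n) (hd : n ≤ (research.length : Int)) (i₀ : Nat) (hi : i₀ < pvDD research n)
    (word : String)
    (hall : ((pvWin research n.toNat word i₀).all fun x => decide (x ≥ k) && decide (x ≥ 1)) = true) :
    pvInner (research.map pvDict) n k (i₀ : Int) word
      = ((pvWin research n.toNat word i₀).sum, false) := by
  have hiw : i₀ + n.toNat ≤ research.length := by simp only [pvDD] at hi; omega
  have hwin := pvWin_eq_range research n.toNat word i₀ hiw
  have helem : ∀ j₁ < n.toNat,
      (decide (pvCnt (research.getD (i₀ + j₁) []) word ≥ k) &&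
       decide (pvCnt (research.getD (i₀ + j₁) []) word ≥ 1)) = true := by
    intro j₁ h1
    rw [List.all_eq_true] at hall
    exact hall _ (by rw [hwin]; exact List.mem_map_of_mem (List.mem_range.mpr h1))
  have hmemday : ∀ j₁ < n.toNat, word ∈ research.getD (i₀ + j₁) [] := by
    intro j₁ h1
    have h2 := helem j₁ h1
    simp only [Bool.and_eq_true, decide_eq_true_eq] at h2
    have : 0 < (research.getD (i₀ + j₁) []).count word := by
      have := h2.2; simp only [pvCnt, PySem.List.count_eq] at this; exact_mod_cast this
    exact List.count_pos_iff.mp this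
  have hdecomp : ∀ j ∈ PySem.List.pyRange ((i₀ : Nat) : Int) (((i₀ : Nat) : Int) + n) 1,
      ∃ j₁ : Nat, j₁ < n.toNat ∧ j = ((i₀ + j₁ : Nat) : Int) := by
    intro j hj
    rw [PySem.List.mem_pyRange_one] at hj
    exact ⟨(j - i₀).toNat, by omega, by omega⟩
  have hf : ∀ j₁ : Nat, j₁ < n.toNat →
      (fun j => (pvDicAt (research.map pvDict) j).get? word) ((i₀ + j₁ : Nat) : Int)
        = some (pvCnt (research.getD (i₀ + j₁) []) word) := by
    intro j₁ h1
    simp only []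
    rw [pvDicAt_eq research (i₀ + j₁) (by omega), pvDict_get?, if_pos (hmemday j₁ h1)]
  unfold pvInner
  rw [pvBreak_good k _ _ ?_ 0]
  · congr 1
    · rw [PySem.List.pyRange_one, List.map_map]
      have ht : (((i₀ : Nat) : Int) + n - ((i₀ : Nat) : Int)).toNat = n.toNat := by omega
      rw [ht, hwin]
      rw [zero_add]
      congr 1
      apply List.map_congr_left
      intro j₁ hj₁
      have h1 := List.mem_range.mp hj₁
      have hcast : ((i₀ : Nat) : Int) + ((j₁ : Nat) : Int) = ((i₀ + j₁ : Nat) : Int) := by omega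
      simp only [Function.comp, hcast, hf j₁ h1]
      rfl
  · intro j hj
    obtain ⟨j₁, h1, rfl⟩ := hdecomp j hj
    refine ⟨pvCnt (research.getD (i₀ + j₁) []) word, hf j₁ h1, ?_⟩
    have h2 := helem j₁ h1
    simp only [Bool.and_eq_true, decide_eq_true_eq] at h2
    omega

theorem pvInner_bad (research : List (List String)) (n k : Int)
    (hn : 1 ≤ n) (hd : n ≤ (research.length : Int)) (i₀ : Nat) (hi : i₀ < pvDD research n)
    (word : String)
    (hall : ((pvWin research n.toNat word i₀).all fun x => decide (x ≥ k) && decide (x ≥ 1)) = false) :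
    (pvInner (research.map pvDict) n k (i₀ : Int) word).2 = true := by
  have hiw : i₀ + n.toNat ≤ research.length := by simp only [pvDD] at hi; omega
  have hwin := pvWin_eq_range research n.toNat word i₀ hiw
  rw [List.all_eq_false] at hall
  obtain ⟨x, hx, hbadx⟩ := hall
  rw [hwin] at hx
  obtain ⟨j₁, hj₁, rfl⟩ := List.mem_map.mp hx
  have h1 := List.mem_range.mp hj₁
  unfold pvInner
  apply pvBreak_bad
  refine ⟨((i₀ + j₁ : Nat) : Int), ?_, ?_⟩
  · rw [PySem.List.mem_pyRange_one]; omega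
  · intro c hc
    rw [pvDicAt_eq research (i₀ + j₁) (by omega), pvDict_get?] at hc
    by_cases hm : word ∈ research.getD (i₀ + j₁) []
    · rw [if_pos hm] at hc
      have hcc : c = pvCnt (research.getD (i₀ + j₁) []) word := by
        injection hc; omega
      have hpos : 0 < (research.getD (i₀ + j₁) []).count word := List.count_pos_iff.mpr hm
      have hpos' : 1 ≤ pvCnt (research.getD (i₀ + j₁) []) word := by
        simp only [pvCnt, PySem.List.count_eq]; exact_mod_cast hpos
      simp only [Bool.and_eq_true, decide_eq_true_eq, not_and, not_le] at hbadx
      by_cases hk1 : k ≤ pvCnt (research.getD (i₀ + j₁) []) word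
      · have := hbadx hk1; omega
      · omega
    · rw [if_neg hm] at hc; exact absurd hc (by simp)

theorem pvWordStep_eq (research : List (List String)) (n k : Int)
    (hn : 1 ≤ n) (hd : n ≤ (research.length : Int)) (i₀ : Nat) (hi : i₀ < pvDD research n)
    (issue : PySem.Dict String Int) (word : String) :
    pvWordStepD (research.map pvDict) n k (i₀ : Int) issue word
      = if pvPred research n k word i₀ then issue.insert word (issue.getD word 0 + 1)
        else issue := by
  unfold pvWordStepD
  by_cases hall : ((pvWin research n.toNat word i₀).all fun x => decide (x ≥ k) && decide (x ≥ 1)) = true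
  · rw [pvInner_good research n k hn hd i₀ hi word hall]
    by_cases hsum : (pvWin research n.toNat word i₀).sum ≥ 2 * n * k
    · rw [if_neg (by simp), if_pos (by simpa using hsum),
          if_pos (by simp [pvPred, hall, hsum])]
    · rw [if_neg (by simp), if_neg (by simpa using hsum),
          if_neg (by simp [pvPred, hall, hsum])]
  · rw [if_pos (pvInner_bad research n k hn hd i₀ hi word (by simpa using hall)),
        if_neg (by simp [pvPred, hall])]


def pvItems (research : List (List String)) (n k : Int) : List (String × Int) :=
  (PySem.Set.ofList (pvE research n k)).map (fun w => (w, (pvN research n k w : Int)))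

def pvAnswerA (research : List (List String)) (n k : Int) : String :=
  if (pvItems research n k).isEmpty then "None"
  else ((PySem.List.pyGet? (PySem.List.sorted2 (pvItems research n k)
          (fun x => -x.2) (fun x => x.1) false) 0).map (fun p => p.1)).getD "None"

theorem pvIssue_items (research : List (List String)) (n k : Int)
    (hn : 1 ≤ n) (hd : n ≤ (research.length : Int)) :
    ((pvE research n k).foldl (fun d w => d.insert w (d.getD w 0 + 1))
        (PySem.Dict.empty : PySem.Dict String Int)).items = pvItems research n k := by
  have hkeys : ((pvE research n k).foldl (fun d w => d.insert w (d.getD w 0 + 1))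
      (PySem.Dict.empty : PySem.Dict String Int)).keys = PySem.Set.ofList (pvE research n k) := by
    rw [PySem.Dict.keys_foldl_insert]
    rfl
  have hnodup : ((pvE research n k).foldl (fun d w => d.insert w (d.getD w 0 + 1))
      (PySem.Dict.empty : PySem.Dict String Int)).keys.Nodup := by
    rw [hkeys]; exact PySem.Set.nodup_ofList _
  calc ((pvE research n k).foldl (fun d w => d.insert w (d.getD w 0 + 1))
            (PySem.Dict.empty : PySem.Dict String Int)).items
      = ((pvE research n k).foldl (fun d w => d.insert w (d.getD w 0 + 1))
            (PySem.Dict.empty : PySem.Dict String Int)).keys.map (fun w => (w,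
          ((pvE research n k).foldl (fun d w => d.insert w (d.getD w 0 + 1))
            (PySem.Dict.empty : PySem.Dict String Int)).getD w 0)) := PySem.Dict.items_eq_map_keys _ hnodup 0
    _ = pvItems research n k := by
        rw [hkeys]
        apply List.map_congr_left
        intro w _
        rw [PySem.Dict.getD_foldl_insert_add_one, PySem.Dict.getD_empty,
            pvE_count research n k hn hd w]
        simp

theorem pvIssueD_eq (research : List (List String)) (n k : Int)
    (hn : 1 ≤ n) (hd : n ≤ (research.length : Int)) :
    pvIssueD (research.map pvDict) (research.length : Int) n k
      = (pvE research n k).foldl (fun d w => d.insert w (d.getD w 0 + 1)) PySem.Dict.empty := by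
  unfold pvIssueD
  rw [PySem.List.pyRange_zero]
  have hdd : ((research.length : Int) - n + 1).toNat = pvDD research n := by
    simp only [pvDD]; omega
  rw [hdd]
  rw [List.foldl_map]
  have houter : ∀ (acc : PySem.Dict String Int), ∀ i₀ ∈ List.range (pvDD research n),
      (fun (issue : PySem.Dict String Int) (x : Nat) =>
        (pvDicAt (research.map pvDict) ((x : Nat) : Int)).keys.foldl
          (pvWordStepD (research.map pvDict) n k ((x : Nat) : Int)) issue) acc i₀
      = (fun (issue : PySem.Dict String Int) (x : Nat) =>
          (pvBlock research n k x).foldl (fun d w => d.insert w (d.getD w 0 + 1)) issue) acc i₀ := by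
    intro acc i₀ hi₀
    have hi := List.mem_range.mp hi₀
    have hilen : i₀ < research.length := by
      simp only [pvDD] at hi; omega
    simp only []
    rw [pvDicAt_eq research i₀ hilen, pvDict_keys]
    have hstep : ∀ (issue : PySem.Dict String Int), ∀ w ∈ PySem.Set.ofList (research.getD i₀ []),
        pvWordStepD (research.map pvDict) n k ((i₀ : Nat) : Int) issue w
        = (fun (issue : PySem.Dict String Int) (w : String) =>
            if pvPred research n k w i₀ then issue.insert w (issue.getD w 0 + 1) else issue) issue w := by
      intro issue w _
      exact pvWordStep_eq research n k hn hd i₀ hi issue w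
    rw [PySem.List.foldl_congr_mem _ _ _ _ hstep]
    rw [PySem.List.foldl_if_eq_foldl_filter]
    rfl
  rw [PySem.List.foldl_congr_mem _ _ _ _ houter]
  rw [← List.foldl_flatMap]
  rfl

theorem solution_eq (research : List (List String)) (n k : Int)
    (hn : 1 ≤ n) (hd : n ≤ (research.length : Int)) :
    solution research n k = pvAnswerA research n k := by
  rw [solution_shape]
  rw [PySem.List.len_eq, if_neg (by omega)]
  have hdic : research.foldl (fun acc data => acc ++ [pvDict data]) [] = research.map pvDict := by
    simpa using PySem.List.foldl_append_singleton_eq_map (fun data => pvDict data) research []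
  rw [hdic, pvIssueD_eq research n k hn hd]
  unfold pvFinal
  rw [pvIssue_items research n k hn hd]
  rfl

-- ---- final comparison: head of A's tuple-key sort = B's running first-strict-maximum ----

def pvLt (a b : String × Int) : Bool :=
  decide ((-a.2 : Int) < -b.2) || (!decide ((-b.2 : Int) < -a.2) && decide (a.1 < b.1))

theorem pvLt_iff (a b : String × Int) :
    pvLt a b = true ↔ (b.2 < a.2 ∨ (a.2 = b.2 ∧ a.1 < b.1)) := by
  simp only [pvLt, Bool.or_eq_true, Bool.and_eq_true, Bool.not_eq_true',
    decide_eq_true_eq, decide_eq_false_iff_not, not_lt]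
  constructor
  · rintro (h | ⟨h1, h2⟩)
    · left; omega
    · by_cases hq : b.2 < a.2
      · left; exact hq
      · right; exact ⟨by omega, h2⟩
  · rintro (h | ⟨h1, h2⟩)
    · left; omega
    · right; exact ⟨by omega, h2⟩

theorem pvLt_asymm (a b : String × Int) (h : pvLt a b = true) : pvLt b a = false := by
  rw [pvLt_iff] at h
  rw [Bool.eq_false_iff, Ne, pvLt_iff]
  rintro (h' | ⟨h1', h2'⟩) <;> rcases h with h | ⟨h1, h2⟩
  · omega
  · omega
  · omega
  · exact absurd (lt_trans h2 h2') (lt_irrefl _)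

theorem pvLt_trans (a b c : String × Int)
    (h1 : pvLt a b = true) (h2 : pvLt b c = true) : pvLt a c = true := by
  rw [pvLt_iff] at h1 h2 ⊢
  rcases h1 with h1 | ⟨h1a, h1b⟩ <;> rcases h2 with h2 | ⟨h2a, h2b⟩
  · left; omega
  · left; omega
  · left; omega
  · right; exact ⟨by omega, lt_trans h1b h2b⟩

theorem pvInsertBy_pairwise (x : String × Int) (l : List (String × Int))
    (hp : l.Pairwise (fun a b => pvLt b a = false)) :
    (PySem.List.insertBy pvLt x l).Pairwise (fun a b => pvLt b a = false) := by
  induction l with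
  | nil => simp [PySem.List.insertBy]
  | cons y ys ih =>
      rcases hp with _ | ⟨hy, hys⟩
      by_cases hxy : pvLt x y = true
      · rw [show PySem.List.insertBy pvLt x (y :: ys) = x :: y :: ys by
            simp [PySem.List.insertBy, hxy]]
        refine List.Pairwise.cons ?_ (List.Pairwise.cons hy hys)
        intro z hz
        rcases List.mem_cons.mp hz with rfl | hz'
        · exact pvLt_asymm x z hxy
        · rw [Bool.eq_false_iff, Ne]
          intro hzx
          have := pvLt_trans z x y hzx hxy
          rw [hy z hz'] at this
          exact Bool.false_ne_true this
      · rw [show PySem.List.insertBy pvLt x (y :: ys) = y :: PySem.List.insertBy pvLt x ys by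
            simp [PySem.List.insertBy, hxy]]
        refine List.Pairwise.cons ?_ (ih hys)
        intro z hz
        rcases (PySem.List.mem_insertBy _ _ _ _).mp hz with rfl | hz'
        · exact Bool.eq_false_iff.mpr hxy
        · exact hy z hz'

theorem pvFoldl_insertBy_pairwise (xs : List (String × Int)) :
    ∀ (acc : List (String × Int)), acc.Pairwise (fun a b => pvLt b a = false) →
      (xs.foldl (fun acc x => PySem.List.insertBy pvLt x acc) acc).Pairwise
        (fun a b => pvLt b a = false) := by
  induction xs with
  | nil => intro acc h; exact h
  | cons x rest ih =>
      intro acc h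
      exact ih _ (pvInsertBy_pairwise x acc h)

theorem pvSorted2_eq (xs : List (String × Int)) :
    PySem.List.sorted2 xs (fun x => -x.2) (fun x => x.1) false
      = xs.foldl (fun acc x => PySem.List.insertBy pvLt x acc) [] := rfl

theorem pvSorted2_pairwise (xs : List (String × Int)) :
    (PySem.List.sorted2 xs (fun x => -x.2) (fun x => x.1) false).Pairwise
      (fun a b => pvLt b a = false) := by
  rw [pvSorted2_eq]
  exact pvFoldl_insertBy_pairwise xs [] (List.Pairwise.nil)

-- B's pair loop keeps the maximum value and, thanks to strict sortedness, its first holder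
theorem pvPair_spec (f : String → Int) :
    ∀ (l : List String) (u : String), (u :: l).Pairwise (· < ·) →
      (l.foldl (pvPairStep f) (f u, u)).1 = f (l.foldl (pvPairStep f) (f u, u)).2 ∧
      (l.foldl (pvPairStep f) (f u, u)).2 ∈ u :: l ∧
      (∀ y ∈ u :: l, f y ≤ (l.foldl (pvPairStep f) (f u, u)).1) ∧
      (∀ y ∈ u :: l, f y = (l.foldl (pvPairStep f) (f u, u)).1 →
        (l.foldl (pvPairStep f) (f u, u)).2 ≤ y) := by
  intro l
  induction l with
  | nil =>
      intro u _
      refine ⟨rfl, List.mem_cons_self, ?_, ?_⟩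
      · intro y hy
        have hyu : y = u := by simpa using hy
        rw [hyu]
        exact le_refl _
      · intro y hy _
        have hyu : y = u := by simpa using hy
        rw [hyu]
        exact le_refl _
  | cons w rest ih =>
      intro u hp
      have hult : ∀ y ∈ w :: rest, u < y := fun y hy => (List.pairwise_cons.mp hp).1 y hy
      have hp' : (w :: rest).Pairwise (· < ·) := (List.pairwise_cons.mp hp).2
      by_cases hfw : f w > f u
      · rw [List.foldl_cons, show pvPairStep f (f u, u) w = (f w, w) by
            simp [pvPairStep, hfw]]
        obtain ⟨h1, h2, h3, h4⟩ := ih w hp'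
        refine ⟨h1, List.mem_cons_of_mem _ h2, ?_, ?_⟩
        · intro y hy
          rcases List.mem_cons.mp hy with hyu | hy'
          · rw [hyu]
            have := h3 w List.mem_cons_self
            omega
          · exact h3 y hy'
        · intro y hy hfy
          rcases List.mem_cons.mp hy with hyu | hy'
          · exfalso
            rw [hyu] at hfy
            have := h3 w List.mem_cons_self
            omega
          · exact h4 y hy' hfy
      · rw [List.foldl_cons, show pvPairStep f (f u, u) w = (f u, u) by
            simp [pvPairStep, hfw]]
        have hpu : (u :: rest).Pairwise (· < ·) := by
          rw [List.pairwise_cons]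
          exact ⟨fun y hy => hult y (List.mem_cons_of_mem _ hy),
            (List.pairwise_cons.mp hp').2⟩
        obtain ⟨h1, h2, h3, h4⟩ := ih u hpu
        refine ⟨h1, ?_, ?_, ?_⟩
        · rcases List.mem_cons.mp h2 with h2' | h2'
          · rw [h2']; exact List.mem_cons_self
          · exact List.mem_cons_of_mem _ (List.mem_cons_of_mem _ h2')
        · intro y hy
          rcases List.mem_cons.mp hy with hyu | hy'
          · rw [hyu]; exact h3 u List.mem_cons_self
          · rcases List.mem_cons.mp hy' with hyw | hy''
            · rw [hyw]
              have := h3 u List.mem_cons_self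
              omega
            · exact h3 y (List.mem_cons_of_mem _ hy'')
        · intro y hy hfy
          rcases List.mem_cons.mp hy with hyu | hy'
          · rw [hyu] at hfy ⊢
            exact h4 u List.mem_cons_self hfy
          · rcases List.mem_cons.mp hy' with hyw | hy''
            · rw [hyw]
              have h3u := h3 u List.mem_cons_self
              rw [hyw] at hfy
              have hfueq : f u = (rest.foldl (pvPairStep f) (f u, u)).1 := by omega
              have hle : (rest.foldl (pvPairStep f) (f u, u)).2 ≤ u :=
                h4 u List.mem_cons_self hfueq
              exact hle.trans (hult w List.mem_cons_self).le
            · exact h4 y (List.mem_cons_of_mem _ hy'') hfy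


theorem pvMem_ofList_pvE (research : List (List String)) (n k : Int)
    (hn : 1 ≤ n) (hd : n ≤ (research.length : Int)) (w : String) :
    w ∈ PySem.Set.ofList (pvE research n k) ↔ 0 < pvN research n k w := by
  rw [PySem.Set.mem_ofList, ← pvE_count research n k hn hd w]
  exact List.count_pos_iff.symm

theorem pvMem_filter (research : List (List String)) (n k : Int)
    (hn : 1 ≤ n) (hd : n ≤ (research.length : Int)) (w : String) :
    w ∈ (pvWords research).filter (fun w => decide (0 < pvN research n k w))
      ↔ 0 < pvN research n k w := by
  rw [List.mem_filter]
  simp only [decide_eq_true_eq]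
  constructor
  · exact And.right
  · intro h
    refine ⟨?_, h⟩
    unfold pvWords
    rw [PySem.List.mem_sorted, PySem.Set.mem_ofList]
    exact pvN_pos_mem research n k w hn hd h

theorem pvAnswerA_eq (research : List (List String)) (n k : Int)
    (hn : 1 ≤ n) (hd : n ≤ (research.length : Int)) :
    pvAnswerA research n k = pvAnswer research n k := by
  unfold pvAnswerA pvAnswer
  cases hws : (pvWords research).filter (fun w => decide (0 < pvN research n k w)) with
  | nil =>
      have hempty : pvItems research n k = [] := by
        unfold pvItems
        rw [List.map_eq_nil_iff, List.eq_nil_iff_forall_not_mem]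
        intro w hw
        have h1 := (pvMem_ofList_pvE research n k hn hd w).mp hw
        have h2 := (pvMem_filter research n k hn hd w).mpr h1
        rw [hws] at h2
        simp at h2
      rw [hempty]
      rfl
  | cons w1 rest =>
      have hw1mem : w1 ∈ (pvWords research).filter (fun w => decide (0 < pvN research n k w)) := by
        rw [hws]; exact List.mem_cons_self
      have hw1 : 0 < pvN research n k w1 := (pvMem_filter research n k hn hd w1).mp hw1mem
      have hne : pvItems research n k ≠ [] := by
        intro hc
        unfold pvItems at hc
        rw [List.map_eq_nil_iff, List.eq_nil_iff_forall_not_mem] at hc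
        exact hc w1 ((pvMem_ofList_pvE research n k hn hd w1).mpr hw1)
      rw [if_neg (by simpa [List.isEmpty_iff] using hne)]
      obtain ⟨m, tail, hL⟩ : ∃ m tail, PySem.List.sorted2 (pvItems research n k)
          (fun x => -x.2) (fun x => x.1) false = m :: tail := by
        cases hL : PySem.List.sorted2 (pvItems research n k) (fun x => -x.2) (fun x => x.1) false with
        | nil =>
            exfalso
            have hperm := PySem.List.sorted2_perm (pvItems research n k)
              (fun x => -x.2) (fun x => x.1) false
            rw [hL] at hperm
            exact hne (List.perm_nil.mp hperm.symm)
        | cons m tail => exact ⟨m, tail, rfl⟩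
      rw [hL]
      rw [PySem.List.pyGet?_zero_cons]
      simp only [Option.map_some, Option.getD_some]
      have hperm := PySem.List.sorted2_perm (pvItems research n k)
        (fun x => -x.2) (fun x => x.1) false
      rw [hL] at hperm
      have hpw := pvSorted2_pairwise (pvItems research n k)
      rw [hL] at hpw
      have hmin : ∀ y ∈ pvItems research n k, y = m ∨ pvLt y m = false := by
        intro y hy
        rcases List.mem_cons.mp (hperm.mem_iff.mpr hy) with h | h
        · left; exact h
        · right; exact (List.pairwise_cons.mp hpw).1 y h
      have hmem_m : m ∈ pvItems research n k := hperm.mem_iff.mp List.mem_cons_self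
      obtain ⟨wm, hwm, hmeq⟩ := List.mem_map.mp hmem_m
      have hpfilter : ((pvWords research).filter
          (fun w => decide (0 < pvN research n k w))).Pairwise (· < ·) :=
        List.Pairwise.filter _ (PySem.List.sorted_ofList_pairwise_lt _)
      rw [hws] at hpfilter
      obtain ⟨h1, h2, h3, h4⟩ := pvPair_spec (fun w => (pvN research n k w : Int)) rest w1 hpfilter
      have hrS : 0 < pvN research n k
          (rest.foldl (pvPairStep fun w => (pvN research n k w : Int))
            ((pvN research n k w1 : Int), w1)).2 := by
        have hmem : (rest.foldl (pvPairStep fun w => (pvN research n k w : Int))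
            ((pvN research n k w1 : Int), w1)).2
            ∈ (pvWords research).filter (fun w => decide (0 < pvN research n k w)) := by
          rw [hws]; exact h2
        exact (pvMem_filter research n k hn hd _).mp hmem
      have hritem : ((rest.foldl (pvPairStep fun w => (pvN research n k w : Int))
            ((pvN research n k w1 : Int), w1)).2,
          (pvN research n k (rest.foldl (pvPairStep fun w => (pvN research n k w : Int))
            ((pvN research n k w1 : Int), w1)).2 : Int)) ∈ pvItems research n k :=
        List.mem_map_of_mem ((pvMem_ofList_pvE research n k hn hd _).mpr hrS)
      have hwmS : 0 < pvN research n k wm := (pvMem_ofList_pvE research n k hn hd wm).mp hwm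
      have hwm_filter : wm ∈ w1 :: rest := by
        rw [← hws]; exact (pvMem_filter research n k hn hd wm).mpr hwmS
      have hwm_le := h3 wm hwm_filter
      rcases hmin _ hritem with heq | hlt
      · rw [← heq]
      · have hm2 : m.2 = (pvN research n k wm : Int) := by rw [← hmeq]
        have hm1 : m.1 = wm := by rw [← hmeq]
        rw [Bool.eq_false_iff, Ne, pvLt_iff] at hlt
        rw [not_or] at hlt
        obtain ⟨hlt1', hlt2'⟩ := hlt
        have hlt1 := not_lt.mp hlt1'
        have hlt2 : _ → ¬ _ := fun hEq => fun hcon => hlt2' ⟨hEq, hcon⟩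
        have hEq : (pvN research n k (rest.foldl (pvPairStep fun w => (pvN research n k w : Int))
            ((pvN research n k w1 : Int), w1)).2 : Int) = m.2 := by
          rw [hm2]; omega
        have hge : m.1 ≤ (rest.foldl (pvPairStep fun w => (pvN research n k w : Int))
            ((pvN research n k w1 : Int), w1)).2 := by
          have := hlt2 hEq
          exact not_lt.mp this
        have hle2 : (rest.foldl (pvPairStep fun w => (pvN research n k w : Int))
            ((pvN research n k w1 : Int), w1)).2 ≤ wm :=
          h4 wm hwm_filter (by rw [← hm2, ← hEq, h1])
        exact le_antisymm hge (by rw [hm1]; exact hle2)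

-- ===== VERDICT (by name: the statement is the Claim_ definition above) =====
theorem solution_spec : Claim_equal_solution := by
  intro research n k hdom hpre
  unfold Spec_solution
  have hn : 1 ≤ n := hpre
  by_cases hcase : (research.length : Int) < n
  · rw [solution_shape, PySem.List.len_eq, if_pos hcase]
    simp only [solution_alt, PySem.List.len_eq]
    rw [if_pos hcase]
  · rw [Int.not_lt] at hcase
    rw [solution_eq research n k hn hcase, solution_alt_eq research n k hn hcase,
        pvAnswerA_eq research n k hn hcase]
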